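-- pv_equiv track=rewrite | github.com/Litt1eBai/anan_subtitle | src/core/subtitle_pipeline.py | merge_incremental_text
-- ===== SOURCE A (Python) =====
-- def merge_incremental_text(current: str, new_text: str) -> str:
--     new_clean = new_text.strip()
--     if not new_clean:
--         return current
--     if not current:
--         return new_clean
--
--     if new_clean.startswith(current):
--         return new_clean
--     if current.endswith(new_clean):
--         return current
--
--     max_overlap = min(len(current), len(new_clean))
--     for overlap in range(max_overlap, 0, -1):
--         if current.endswith(new_clean[:overlap]):
--             return current + new_clean[overlap:]
--     return current + new_clean
-- ===== SOURCE B (Python) =====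
-- def _chase(p, fail, k, c):
--     # follow failure links until k can be extended by c (or k == 0)
--     while k and (k == len(p) or p[k] != c):
--         k = fail[k - 1]
--     return k
--
--
-- def merge_incremental_text(current: str, new_text: str) -> str:
--     new_clean = new_text.strip()
--     if not new_clean:
--         return current
--     if not current:
--         return new_clean
--     p = new_clean
--     # KMP failure table of p
--     fail = [0] * len(p)
--     k = 0
--     for i in range(1, len(p)):
--         k = _chase(p, fail, k, p[i])
--         if p[i] == p[k]:
--             k += 1
--         fail[i] = k
--     # stream current through the automaton: final q = longest k with p[:k] a suffix of current
--     q = 0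
--     for c in current:
--         q = _chase(p, fail, q, c)
--         if q < len(p) and c == p[q]:
--             q += 1
--     return current + p[q:]
-- ===== Notes on version B (the rewrite author's own statement) =====
-- stated objective: faster
-- what changed: A's descending brute-force scan (try every overlap length, each checked with endswith) is replaced by a KMP failure table of new_clean plus a single automaton pass over current, which also subsumes A's startswith/endswith special cases.
import Mathlib
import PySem

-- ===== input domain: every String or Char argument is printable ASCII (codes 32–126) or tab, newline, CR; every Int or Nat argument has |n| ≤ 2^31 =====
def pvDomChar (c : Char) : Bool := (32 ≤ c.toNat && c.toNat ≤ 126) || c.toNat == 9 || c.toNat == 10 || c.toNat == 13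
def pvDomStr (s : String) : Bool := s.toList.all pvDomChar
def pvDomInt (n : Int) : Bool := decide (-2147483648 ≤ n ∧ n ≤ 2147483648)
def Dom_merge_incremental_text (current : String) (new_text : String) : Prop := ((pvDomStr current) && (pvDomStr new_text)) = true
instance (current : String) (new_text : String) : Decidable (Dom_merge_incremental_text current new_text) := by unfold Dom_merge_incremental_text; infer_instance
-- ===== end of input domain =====

-- B replaces A's quadratic descending endswith scan by a KMP failure table of new_clean
-- plus a single automaton pass over current (objective: faster, asymptotic).

-- ===== PORT A =====
-- for overlap in range(max_overlap, 0, -1): if current.endswith(new_clean[:overlap]): return current + new_clean[overlap:]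
def mergeLoopA (t p : List Char) : List Int → List Char
  | [] => t ++ p
  | overlap :: rest =>
      if PySem.Chars.endswith t (PySem.List.slice p none (some overlap)) then
        t ++ PySem.List.slice p (some overlap) none
      else mergeLoopA t p rest

def merge_incremental_text (current : String) (new_text : String) : String :=
  let new_clean := PySem.Str.strip new_text
  if new_clean.toList = [] then current
  else if current.toList = [] then new_clean
  else if PySem.Chars.startswith new_clean.toList current.toList then new_clean
  else if PySem.Chars.endswith current.toList new_clean.toList then current
  else
    let max_overlap : Int := min (current.toList.length : Int) (new_clean.toList.length : Int)
    String.ofList (mergeLoopA current.toList new_clean.toList (PySem.List.pyRange max_overlap 0 (-1)))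

-- ===== PORT B =====
-- _chase: while k and (k == len(p) or p[k] != c): k = fail[k-1]   (fuel = initial k bounds the iterations)
def pvChase (p : List Char) (fail : List Nat) (c : Char) : Nat → Nat → Nat
  | 0, k => k
  | fuel + 1, k =>
      if k ≠ 0 ∧ (k = p.length ∨ p.getD k ' ' ≠ c) then
        pvChase p fail c fuel (fail.getD (k - 1) 0)
      else k

-- one iteration of the failure-table loop body
def pvTableStep (p : List Char) (st : List Nat × Nat) (i : Int) : List Nat × Nat :=
  let c := PySem.List.pyGetD p i ' '
  let k := pvChase p st.1 c st.2 st.2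
  let k := if c = p.getD k ' ' then k + 1 else k
  (st.1.set i.toNat k, k)

-- fail = [0]*len(p); k = 0; for i in range(1, len(p)): …
def pvBuildFail (p : List Char) : List Nat :=
  ((PySem.List.pyRange 1 (p.length : Int) 1).foldl (pvTableStep p)
    (List.replicate p.length 0, 0)).1

-- q = 0; for c in current: q = _chase(p, fail, q, c); if q < len(p) and c == p[q]: q += 1
def pvScan (p : List Char) (fail : List Nat) (t : List Char) : Nat :=
  t.foldl (fun q c =>
    let q := pvChase p fail c q q
    if q < p.length ∧ c = p.getD q ' ' then q + 1 else q) 0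

def merge_incremental_text_alt (current : String) (new_text : String) : String :=
  let new_clean := PySem.Str.strip new_text
  if new_clean.toList = [] then current
  else if current.toList = [] then new_clean
  else
    let p := new_clean.toList
    let q := pvScan p (pvBuildFail p) current.toList
    String.ofList (current.toList ++ p.drop q)

-- ===== PRECONDITION & SPEC =====
def Spec_merge_incremental_text (current : String) (new_text : String) (out : String) : Prop := out = merge_incremental_text_alt current new_text
instance (current : String) (new_text : String) (out : String) : Decidable (Spec_merge_incremental_text current new_text out) := by unfold Spec_merge_incremental_text; infer_instance

-- ===== CLAIM (what is proved, stated in full; the proofs are below) =====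
def Claim_equal_merge_incremental_text : Prop := ∀ (current : String) (new_text : String), Dom_merge_incremental_text current new_text → Spec_merge_incremental_text current new_text (merge_incremental_text current new_text)

-- ===== LEMMAS AND PROOFS =====

def pvPS (p t : List Char) (k : Nat) : Prop := k ≤ p.length ∧ p.take k <:+ t
def pvIsMax (p t : List Char) (q : Nat) : Prop := pvPS p t q ∧ ∀ k, pvPS p t k → k ≤ q
lemma pvPS_zero (p t : List Char) : pvPS p t 0 := ⟨Nat.zero_le _, by simp⟩
lemma pvPS_le_len {p t : List Char} {k : Nat} (h : pvPS p t k) : k ≤ t.length := by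
  have := h.2.length_le
  simpa [List.length_take, Nat.min_eq_left h.1] using this
lemma pvIsMax_nil (p : List Char) : pvIsMax p [] 0 :=
  ⟨pvPS_zero p [], fun k hk => by simpa using pvPS_le_len hk⟩
lemma suffix_drop_one {s t : List Char} (h : s <:+ t) (hl : s.length < t.length) : s <:+ t.drop 1 := by
  obtain ⟨u, rfl⟩ := h
  have hu : 1 ≤ u.length := by
    rcases u with _ | ⟨a, u⟩
    · simp at hl
    · simp
  rw [List.drop_append_of_le_length hu]
  exact ⟨u.drop 1, rfl⟩
lemma pvPS_take_suffix {p t : List Char} {k q : Nat} (hk : pvPS p t k) (hq : pvPS p t q) (hkq : k ≤ q) :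
    p.take k <:+ p.take q := by
  apply List.suffix_of_suffix_length_le hk.2 hq.2
  simp [List.length_take, Nat.min_eq_left hk.1, Nat.min_eq_left hq.1, hkq]

lemma pvChase_spec (p : List Char) (fail : List Nat) (c : Char) (t : List Char) :
    ∀ fuel q, q ≤ fuel → pvPS p t q →
    (∀ k, pvPS p t k → k < p.length → p.getD k ' ' = c → k ≤ q) →
    (∀ j, j < q → pvIsMax p ((p.take (j + 1)).drop 1) (fail.getD j 0)) →
    pvPS p t (pvChase p fail c fuel q) ∧
    (pvChase p fail c fuel q = 0 ∨ (pvChase p fail c fuel q < p.length ∧ p.getD (pvChase p fail c fuel q) ' ' = c)) ∧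
    (∀ k, pvPS p t k → k < p.length → p.getD k ' ' = c → k ≤ pvChase p fail c fuel q) ∧
    pvChase p fail c fuel q ≤ q := by
  intro fuel
  induction fuel with
  | zero =>
      intro q hq hps hmax hfail
      have hq0 : q = 0 := Nat.le_zero.mp hq
      subst hq0
      simp only [pvChase]
      refine ⟨hps, Or.inl ?_, hmax, le_refl _⟩
      trivial
  | succ fuel ih =>
      intro q hq hps hmax hfail
      by_cases hC : q ≠ 0 ∧ (q = p.length ∨ p.getD q ' ' ≠ c)
      · -- recurse
        have hq0 : q ≠ 0 := hC.1
        have hq1 : 1 ≤ q := Nat.one_le_iff_ne_zero.mpr hq0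
        have hfj := hfail (q - 1) (by omega)
        have hqq : q - 1 + 1 = q := by omega
        rw [hqq] at hfj
        set q₂ := fail.getD (q - 1) 0 with hq₂def
        -- length of the border text
        have hlen : ((p.take q).drop 1).length = q - 1 := by
          simp [List.length_take, Nat.min_eq_left hps.1]
        have hq₂ps : pvPS p t q₂ := by
          refine ⟨hfj.1.1, ?_⟩
          exact hfj.1.2.trans ((List.drop_suffix 1 _).trans hps.2)
        have hq₂le : q₂ ≤ q - 1 := by
          have := pvPS_le_len hfj.1
          omega
        have hmax₂ : ∀ k, pvPS p t k → k < p.length → p.getD k ' ' = c → k ≤ q₂ := by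
          intro k hk hkm hkc
          have hkq : k ≤ q := hmax k hk hkm hkc
          have hkq' : k < q := by
            rcases Nat.lt_or_ge k q with h | h
            · exact h
            · exfalso
              have : k = q := by omega
              subst this
              rcases hC.2 with h1 | h1
              · omega
              · exact h1 hkc
          have hsfx : p.take k <:+ p.take q := pvPS_take_suffix hk hps (le_of_lt hkq')
          have hsfx' : p.take k <:+ (p.take q).drop 1 := by
            apply suffix_drop_one hsfx
            simp [List.length_take, Nat.min_eq_left hk.1, Nat.min_eq_left hps.1]
            omega
          exact hfj.2 k ⟨hk.1, hsfx'⟩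
        have hfail₂ : ∀ j, j < q₂ → pvIsMax p ((p.take (j + 1)).drop 1) (fail.getD j 0) := by
          intro j hj; exact hfail j (by omega)
        have hrec := ih q₂ (by omega) hq₂ps hmax₂ hfail₂
        have heq : pvChase p fail c (fuel + 1) q = pvChase p fail c fuel q₂ := by
          simp only [pvChase, if_pos hC, hq₂def]
        rw [heq]
        exact ⟨hrec.1, hrec.2.1, hrec.2.2.1, le_trans hrec.2.2.2 (by omega)⟩
      · -- stop
        have heq : pvChase p fail c (fuel + 1) q = q := by
          simp only [pvChase, if_neg hC]
        rw [heq]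
        refine ⟨hps, ?_, hmax, le_refl _⟩
        push Not at hC
        by_cases hq0 : q = 0
        · exact Or.inl hq0
        · right
          have := hC hq0
          exact ⟨lt_of_le_of_ne hps.1 this.1, this.2⟩

lemma pvStep_spec (p : List Char) (fail : List Nat) (t : List Char) (q : Nat) (c : Char)
    (hm : pvIsMax p t q)
    (hfail : ∀ j, j < q → pvIsMax p ((p.take (j + 1)).drop 1) (fail.getD j 0)) :
    pvIsMax p (t ++ [c])
      (if pvChase p fail c q q < p.length ∧ c = p.getD (pvChase p fail c q q) ' ' then pvChase p fail c q q + 1 else pvChase p fail c q q) := by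
  have hch := pvChase_spec p fail c t q q (le_refl _) hm.1
    (fun k hk _ _ => hm.2 k hk) hfail
  set r := pvChase p fail c q q with hrdef
  have hmaxstep : ∀ k, pvPS p (t ++ [c]) k →
      k ≤ (if r < p.length ∧ c = p.getD r ' ' then r + 1 else r) := by
    intro k' hk'
    rcases Nat.eq_zero_or_pos k' with hk0 | hk0
    · subst hk0; split_ifs <;> omega
    · obtain ⟨e, rfl⟩ : ∃ e, k' = e + 1 := ⟨k' - 1, by omega⟩
      have hk'm : e + 1 ≤ p.length := hk'.1
      have hk1m : e < p.length := by omega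
      have htake : p.take (e + 1) = p.take e ++ [p[e]] := by
        rw [List.take_add_one]
        simp [List.getElem?_eq_getElem hk1m]
      rcases List.suffix_concat_iff.mp hk'.2 with hnil | ⟨s, hs1, hs2⟩
      · exfalso
        have : (p.take (e + 1)).length = e + 1 := by simp [Nat.min_eq_left hk'm]
        rw [hnil] at this; simp at this
      · rw [htake] at hs1
        have h1 := List.append_inj' hs1 (by simp)
        have hlastc : p[e] = c := by
          simpa using congrArg (fun l => l.getD 0 ' ') h1.2
        have hps1 : pvPS p t e := ⟨by omega, h1.1 ▸ hs2⟩
        have hle : e ≤ r :=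
          hch.2.2.1 e hps1 hk1m (by rw [List.getD_eq_getElem _ _ hk1m, hlastc])
        split_ifs with hcond
        · omega
        · rcases hch.2.1 with hr0 | hr
          · exfalso
            apply hcond
            have he0 : e = 0 := by omega
            rw [hr0]
            refine ⟨by omega, ?_⟩
            rw [List.getD_eq_getElem _ _ (by omega : 0 < p.length)]
            subst he0
            exact hlastc.symm
          · exact absurd ⟨hr.1, hr.2.symm⟩ hcond
  refine ⟨?_, hmaxstep⟩
  split_ifs with hcond
  · refine ⟨by omega, ?_⟩
    have hpr : p.getD r ' ' = c := hcond.2.symm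
    rw [List.getD_eq_getElem _ _ hcond.1] at hpr
    have htk : p.take (r + 1) = p.take r ++ [c] := by
      rw [List.take_add_one]
      simp [List.getElem?_eq_getElem hcond.1, hpr]
    obtain ⟨u, hu⟩ := hch.1.2
    exact ⟨u, by rw [htk, ← List.append_assoc, hu]⟩
  · rcases hch.2.1 with hr0 | hr
    · rw [hr0]; exact ⟨Nat.zero_le _, by simp⟩
    · exact absurd ⟨hr.1, hr.2.symm⟩ hcond

lemma pvScan_step_spec (p : List Char) (fail : List Nat)
    (hfail : ∀ j, j < p.length → pvIsMax p ((p.take (j + 1)).drop 1) (fail.getD j 0)) :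
    ∀ (t pre : List Char) (q : Nat), pvIsMax p pre q →
    pvIsMax p (pre ++ t)
      (t.foldl (fun q c =>
        let q := pvChase p fail c q q
        if q < p.length ∧ c = p.getD q ' ' then q + 1 else q) q) := by
  intro t
  induction t with
  | nil => intro pre q hm; simpa using hm
  | cons c t ih =>
      intro pre q hm
      have hstep := pvStep_spec p fail pre q c hm
        (fun j hj => hfail j (lt_of_lt_of_le hj hm.1.1))
      have := ih (pre ++ [c]) _ hstep
      simpa [List.append_assoc] using this


lemma pvText_len {p : List Char} {n : Nat} (hn : n ≤ p.length) :
    ((p.take n).drop 1).length = n - 1 := by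
  simp [List.length_take, Nat.min_eq_left hn]

lemma pvText_succ {p : List Char} {n : Nat} (h1 : 1 ≤ n) (h2 : n < p.length) :
    (p.take (n + 1)).drop 1 = (p.take n).drop 1 ++ [p[n]] := by
  rw [List.take_add_one]
  rw [List.getElem?_eq_getElem h2]
  simp only [Option.toList_some]
  rw [List.drop_append_of_le_length]
  simp [List.length_take]
  omega

lemma pvTable_inv (p : List Char) : ∀ n, 1 ≤ n → n ≤ p.length →
    ((PySem.List.pyRange 1 (n : Int) 1).foldl (pvTableStep p) (List.replicate p.length 0, 0)).1.length = p.length ∧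
    (∀ j, j < n → pvIsMax p ((p.take (j + 1)).drop 1)
      (((PySem.List.pyRange 1 (n : Int) 1).foldl (pvTableStep p) (List.replicate p.length 0, 0)).1.getD j 0)) ∧
    pvIsMax p ((p.take n).drop 1)
      ((PySem.List.pyRange 1 (n : Int) 1).foldl (pvTableStep p) (List.replicate p.length 0, 0)).2 := by
  intro n
  induction n with
  | zero => omega
  | succ n ih =>
      intro h1 h2
      rcases Nat.eq_zero_or_pos n with hn0 | hn0
      · -- n + 1 = 1 : empty range, initial state
        subst hn0
        rw [PySem.List.pyRange_one_eq_nil (by norm_num)]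
        simp only [List.foldl_nil]
        have htext : (p.take 1).drop 1 = [] := by
          rw [List.drop_eq_nil_iff]; simp
        refine ⟨by simp, ?_, by rw [htext]; exact pvIsMax_nil p⟩
        intro j hj
        have hj0 : j = 0 := by omega
        subst hj0
        have : (List.replicate p.length (0:Nat)).getD 0 0 = 0 := by
          rcases Nat.eq_zero_or_pos p.length with h | h
          · simp [h]
          · simp [List.getD_eq_getElem?_getD, h]
        rw [this, htext]
        exact pvIsMax_nil p
      · -- inductive step : n ≥ 1, n < p.length
        have hlt : n < p.length := by omega
        obtain ⟨hlen, hentries, hk⟩ := ih (by omega) (le_of_lt hlt)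
        have hsplit : PySem.List.pyRange 1 ((n+1 : Nat) : Int) 1
            = PySem.List.pyRange 1 (n : Int) 1 ++ [(n : Int)] := by
          push_cast
          exact PySem.List.pyRange_one_succ_right (by exact_mod_cast hn0)
        rw [hsplit, List.foldl_append]
        set st := (PySem.List.pyRange 1 (n : Int) 1).foldl (pvTableStep p) (List.replicate p.length 0, 0) with hstdef
        -- the processed character
        have hc : PySem.List.pyGetD p ((n : Nat) : Int) ' ' = p[n] := by
          rw [PySem.List.pyGetD_natCast, List.getD_eq_getElem?_getD, List.getElem?_eq_getElem hlt]
          rfl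
        -- bound on the current state
        have hst2len : st.2 ≤ n - 1 := by
          have := pvPS_le_len hk.1
          rw [pvText_len (le_of_lt hlt)] at this
          exact this
        -- fail entries needed by chase: j < st.2 < n
        have hfail' : ∀ j, j < st.2 → pvIsMax p ((p.take (j + 1)).drop 1) (st.1.getD j 0) := by
          intro j hj; exact hentries j (by omega)
        -- the chase result is below p.length, so the unguarded if agrees with the guarded one
        have hch := pvChase_spec p st.1 (p[n]) ((p.take n).drop 1) st.2 st.2 (le_refl _) hk.1
          (fun k hkk _ _ => hk.2 k hkk) hfail'
        have hrlt : pvChase p st.1 (p[n]) st.2 st.2 < p.length := by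
          have := hch.2.2.2; omega
        have hstep := pvStep_spec p st.1 ((p.take n).drop 1) st.2 (p[n]) hk hfail'
        rw [← pvText_succ hn0 hlt] at hstep
        -- compute the new state
        have hifeq : (if p[n] = p.getD (pvChase p st.1 (p[n]) st.2 st.2) ' '
              then pvChase p st.1 (p[n]) st.2 st.2 + 1 else pvChase p st.1 (p[n]) st.2 st.2)
            = (if pvChase p st.1 (p[n]) st.2 st.2 < p.length ∧ p[n] = p.getD (pvChase p st.1 (p[n]) st.2 st.2) ' '
              then pvChase p st.1 (p[n]) st.2 st.2 + 1 else pvChase p st.1 (p[n]) st.2 st.2) := by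
          by_cases h : p[n] = p.getD (pvChase p st.1 (p[n]) st.2 st.2) ' '
          · rw [if_pos h, if_pos ⟨hrlt, h⟩]
          · rw [if_neg h, if_neg (fun hh => h hh.2)]
        have hnewstate : (PySem.List.pyRange 1 (n : Int) 1 ++ [(n : Int)]).foldl (pvTableStep p) (List.replicate p.length 0, 0) = pvTableStep p st (n : Int) := by
          rw [List.foldl_append, ← hstdef]; simp
        have hstepval : pvTableStep p st (n : Int) =
            (st.1.set n (if pvChase p st.1 (p[n]) st.2 st.2 < p.length ∧ p[n] = p.getD (pvChase p st.1 (p[n]) st.2 st.2) ' '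
              then pvChase p st.1 (p[n]) st.2 st.2 + 1 else pvChase p st.1 (p[n]) st.2 st.2),
             (if pvChase p st.1 (p[n]) st.2 st.2 < p.length ∧ p[n] = p.getD (pvChase p st.1 (p[n]) st.2 st.2) ' '
              then pvChase p st.1 (p[n]) st.2 st.2 + 1 else pvChase p st.1 (p[n]) st.2 st.2)) := by
          simp only [pvTableStep, hc, ← hifeq]
          simp
        set knew := (if pvChase p st.1 (p[n]) st.2 st.2 < p.length ∧ p[n] = p.getD (pvChase p st.1 (p[n]) st.2 st.2) ' '
              then pvChase p st.1 (p[n]) st.2 st.2 + 1 else pvChase p st.1 (p[n]) st.2 st.2) with hknewdef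
        simp only [List.foldl_cons, List.foldl_nil]
        refine ⟨?_, ?_, ?_⟩
        · rw [hstepval]; simp [hlen]
        · intro j hj
          rw [hstepval]
          rcases Nat.lt_or_ge j n with hjn | hjn
          · -- old entry
            have : (st.1.set n knew).getD j 0 = st.1.getD j 0 := by
              rw [List.getD_eq_getElem?_getD, List.getElem?_set_ne (by omega), ← List.getD_eq_getElem?_getD]
            rw [this]
            exact hentries j hjn
          · -- j = n : the new entry
            have hjeq : j = n := by omega
            subst hjeq
            have : (st.1.set j knew).getD j 0 = knew := by
              rw [List.getD_eq_getElem?_getD, List.getElem?_set_self (by omega : j < st.1.length)]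
              rfl
            rw [this]
            exact hstep
        · rw [hstepval]
          exact hstep


lemma pvBuildFail_spec (p : List Char) (hp : p ≠ []) :
    ∀ j, j < p.length → pvIsMax p ((p.take (j + 1)).drop 1) ((pvBuildFail p).getD j 0) := by
  have hm : 1 ≤ p.length := by
    rcases p with _ | _
    · simp at hp
    · simp
  have := pvTable_inv p p.length hm (le_refl _)
  exact this.2.1

lemma pvScan_isMax (p t : List Char) (hp : p ≠ []) :
    pvIsMax p t (pvScan p (pvBuildFail p) t) := by
  have h := pvScan_step_spec p (pvBuildFail p) (pvBuildFail_spec p hp) t [] 0 (pvIsMax_nil p)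
  simpa [pvScan] using h

lemma pvIsMax_unique {p t : List Char} {q q' : Nat} (h : pvIsMax p t q) (h' : pvIsMax p t q') : q = q' :=
  Nat.le_antisymm (h'.2 q h.1) (h.2 q' h'.1)

lemma mergeLoopA_eq (t p : List Char) (M : Nat) (hM : pvIsMax p t M) :
    ∀ a : Nat, M ≤ a → a ≤ min t.length p.length →
    mergeLoopA t p (PySem.List.pyRange ((a : Int)) 0 (-1)) = t ++ p.drop M := by
  intro a
  induction a with
  | zero =>
      intro ha _
      have hM0 : M = 0 := by omega
      rw [PySem.List.pyRange_neg_one_eq_nil (by norm_num)]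
      simp [mergeLoopA, hM0]
  | succ a ih =>
      intro ha hbound
      rw [PySem.List.pyRange_neg_one_cons (by positivity)]
      have hcast : ((a + 1 : Nat) : Int) - 1 = (a : Int) := by push_cast; ring
      rw [hcast]
      simp only [mergeLoopA]
      rw [PySem.List.slice_to_natCast]
      rcases Nat.lt_or_ge M (a + 1) with hlt | hge
      · -- a + 1 overshoots : the test must fail, recurse
        have hfalse : PySem.Chars.endswith t (p.take (a + 1)) = false := by
          rw [Bool.eq_false_iff]
          intro hcontra
          have hsfx := (PySem.Chars.endswith_iff t (p.take (a + 1))).mp hcontra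
          have : a + 1 ≤ M := hM.2 (a + 1) ⟨by omega, hsfx⟩
          omega
        rw [hfalse]
        simp only [Bool.false_eq_true, if_false]
        exact ih (by omega) (by omega)
      · -- M = a + 1 : the test succeeds
        have hMeq : M = a + 1 := by omega
        have htrue : PySem.Chars.endswith t (p.take (a + 1)) = true := by
          rw [PySem.Chars.endswith_iff, ← hMeq]

          exact hM.1.2
        rw [htrue]
        simp only [if_true]
        rw [PySem.List.slice_from_natCast, hMeq]

set_option maxHeartbeats 1000000 in
lemma merge_eq_canonical (current new_text : String) :
    merge_incremental_text current new_text = merge_incremental_text_alt current new_text := by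
  unfold merge_incremental_text merge_incremental_text_alt
  dsimp only
  by_cases h1 : (PySem.Str.strip new_text).toList = []
  · rw [if_pos h1, if_pos h1]
  · rw [if_neg h1, if_neg h1]
    by_cases h2 : current.toList = []
    · rw [if_pos h2, if_pos h2]
    · rw [if_neg h2, if_neg h2]
      set p := (PySem.Str.strip new_text).toList with hpdef
      set t := current.toList with htdef
      have hscan := pvScan_isMax p t h1
      set q := pvScan p (pvBuildFail p) t with hqdef
      by_cases hsw : PySem.Chars.startswith p t
      · -- new_clean.startswith(current)
        rw [if_pos hsw]
        have hpre : t <+: p := (PySem.Chars.startswith_iff p t).mp hsw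
        have htake : t = p.take t.length := List.prefix_iff_eq_take.mp hpre
        have hmax : pvIsMax p t t.length := by
          refine ⟨⟨hpre.length_le, ?_⟩, fun k hk => pvPS_le_len hk⟩
          conv_lhs => rw [← htake]
        have hq : q = t.length := pvIsMax_unique hscan hmax
        rw [hq]
        conv_lhs => rw [← String.ofList_toList (s := PySem.Str.strip new_text)]
        rw [← hpdef]
        congr 1
        conv_lhs => rw [← List.take_append_drop t.length p, ← htake]
      · rw [if_neg hsw]
        by_cases hew : PySem.Chars.endswith t p
        · -- current.endswith(new_clean)
          rw [if_pos hew]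
          have hsfx : p <:+ t := (PySem.Chars.endswith_iff t p).mp hew
          have hmax : pvIsMax p t p.length := ⟨⟨le_refl _, by simpa using hsfx⟩, fun k hk => hk.1⟩
          have hq : q = p.length := pvIsMax_unique hscan hmax
          rw [hq, List.drop_length, List.append_nil]
          conv_lhs => rw [← String.ofList_toList (s := current)]
        · rw [if_neg hew]
          have hqle : q ≤ min t.length p.length :=
            le_min (pvPS_le_len hscan.1) hscan.1.1
          have hcast : min ((t.length : Int)) ((p.length : Int)) = ((min t.length p.length : Nat) : Int) := by
            push_cast; rfl
          rw [hcast, mergeLoopA_eq t p q hscan (min t.length p.length) hqle (le_refl _)]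

-- ===== VERDICT (by name: the statement is the Claim_ definition above) =====
theorem merge_incremental_text_spec : Claim_equal_merge_incremental_text := by
  intro current new_text _
  unfold Spec_merge_incremental_text
  exact merge_eq_canonical current new_text
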